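-- pv_equiv track=rewrite | github.com/Hassaan-Raza/ERP-Chatbot | agents/sales_agent.py | _detect_method
-- ===== SOURCE A (Python) =====
-- def _detect_method(message):
--     """Detect which method to call based on message content"""
--     message_lower = message.lower()
--
--     if any(word in message_lower for word in ['create', 'new', 'how to', 'make', 'generate', 'add']) and \
--        any(word in message_lower for word in ['invoice', 'sales invoice', 'bill']):
--         return "get_invoice_creation_guide"
--     elif any(word in message_lower for word in ['forecast', 'projection', 'prediction']):
--         return "get_sales_forecast"
--     elif any(word in message_lower for word in ['region', 'area', 'territory', 'location']):
--         return "get_regional_sales"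
--     elif any(word in message_lower for word in ['product', 'item', 'sku']):
--         return "get_product_sales"
--     elif any(word in message_lower for word in ['top', 'best', 'popular', 'leading']):
--         return "get_top_products"
--     else:
--         return "get_sales_summary"
-- ===== SOURCE B (Python) =====
-- _KEYWORD_BITS = {
--     'create': 1, 'new': 1, 'how to': 1, 'make': 1, 'generate': 1, 'add': 1,
--     'invoice': 2, 'sales invoice': 2, 'bill': 2,
--     'forecast': 4, 'projection': 4, 'prediction': 4,
--     'region': 8, 'area': 8, 'territory': 8, 'location': 8,
--     'product': 16, 'item': 16, 'sku': 16,
--     'top': 32, 'best': 32, 'popular': 32, 'leading': 32,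
-- }
--
-- _METHOD_BY_BIT = {
--     4: "get_sales_forecast",
--     8: "get_regional_sales",
--     16: "get_product_sales",
--     32: "get_top_products",
-- }
--
--
-- def _detect_method(message):
--     m = message.lower()
--     mask = 0
--     for word, bit in _KEYWORD_BITS.items():
--         if word in m:
--             mask |= bit
--     if mask & 3 == 3:
--         return "get_invoice_creation_guide"
--     # lowest set bit among the single-group rules gives the priority winner
--     low = (mask & ~3) & -(mask & ~3)
--     return _METHOD_BY_BIT.get(low, "get_sales_summary")
-- ===== Notes on version B (the rewrite author's own statement) =====
-- stated objective: alternative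
-- what changed: Instead of A's if/elif chain that lazily re-scans keyword groups per branch, B makes one exhaustive pass over a flat keyword-to-bit dictionary building a match bitmask, then picks the method by bitmask arithmetic (AND test for the two-group rule, lowest-set-bit plus a bit-to-method dict for the rest).
import Mathlib
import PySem

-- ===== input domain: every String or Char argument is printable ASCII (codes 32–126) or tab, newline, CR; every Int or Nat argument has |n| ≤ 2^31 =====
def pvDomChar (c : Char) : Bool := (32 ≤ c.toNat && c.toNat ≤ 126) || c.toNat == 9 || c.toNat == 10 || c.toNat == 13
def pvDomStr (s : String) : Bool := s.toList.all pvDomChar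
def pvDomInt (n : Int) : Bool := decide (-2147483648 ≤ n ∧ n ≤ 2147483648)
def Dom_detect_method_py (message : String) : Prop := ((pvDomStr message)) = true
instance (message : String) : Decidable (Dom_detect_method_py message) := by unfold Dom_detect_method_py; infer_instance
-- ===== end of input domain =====

-- B builds a keyword→bit match bitmask in one exhaustive pass, then picks the method by bitmask arithmetic (objective: alternative).

-- ===== PORT A =====
def detect_method_py (message : String) : String :=
  let message_lower := PySem.Str.lower message
  if (["create", "new", "how to", "make", "generate", "add"].any fun word => PySem.Str.isIn word message_lower) &&
     (["invoice", "sales invoice", "bill"].any fun word => PySem.Str.isIn word message_lower) then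
    "get_invoice_creation_guide"
  else if ["forecast", "projection", "prediction"].any (fun word => PySem.Str.isIn word message_lower) then
    "get_sales_forecast"
  else if ["region", "area", "territory", "location"].any (fun word => PySem.Str.isIn word message_lower) then
    "get_regional_sales"
  else if ["product", "item", "sku"].any (fun word => PySem.Str.isIn word message_lower) then
    "get_product_sales"
  else if ["top", "best", "popular", "leading"].any (fun word => PySem.Str.isIn word message_lower) then
    "get_top_products"
  else
    "get_sales_summary"

-- ===== PORT B =====
def pvKeywordBits : List (String × Nat) :=
  [("create", 1), ("new", 1), ("how to", 1), ("make", 1), ("generate", 1), ("add", 1),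
   ("invoice", 2), ("sales invoice", 2), ("bill", 2),
   ("forecast", 4), ("projection", 4), ("prediction", 4),
   ("region", 8), ("area", 8), ("territory", 8), ("location", 8),
   ("product", 16), ("item", 16), ("sku", 16),
   ("top", 32), ("best", 32), ("popular", 32), ("leading", 32)]

def pvMethodByBit : PySem.Dict Nat String :=
  PySem.Dict.ofList
    [(4, "get_sales_forecast"), (8, "get_regional_sales"),
     (16, "get_product_sales"), (32, "get_top_products")]

-- mask, h are nonnegative Python ints, so Nat's >>>, ^^^, &&& and (h - 1) match Python exactly here
-- (for h = 0, Python's h & (h - 1) = 0 & -1 = 0 and Nat's 0 &&& (0 - 1) = 0 agree).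
def detect_method_py_alt (message : String) : String :=
  let m := PySem.Str.lower message
  let mask := pvKeywordBits.foldl (fun acc p => if PySem.Str.isIn p.1 m then acc ||| p.2 else acc) 0
  if mask &&& 3 == 3 then
    "get_invoice_creation_guide"
  else
    let h := mask >>> 2
    let low := (h ^^^ (h &&& (h - 1))) <<< 2
    PySem.Dict.getD pvMethodByBit low "get_sales_summary"

-- ===== PRECONDITION & SPEC =====
def Spec_detect_method_py (message : String) (out : String) : Prop := out = detect_method_py_alt message
instance (message : String) (out : String) : Decidable (Spec_detect_method_py message out) := by unfold Spec_detect_method_py; infer_instance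

-- ===== CLAIM (what is proved, stated in full; the proofs are below) =====
def Claim_equal_detect_method_py : Prop := ∀ (message : String), Dom_detect_method_py message → Spec_detect_method_py message (detect_method_py message)

-- ===== LEMMAS AND PROOFS =====

-- Folding a constant-bit chunk of the keyword table ORs in the bit iff some word of the chunk matches.
theorem pvFoldChunk (m : String) (b : Nat) (ws : List String) (acc : Nat) :
    (ws.map (fun w => (w, b))).foldl (fun acc p => if PySem.Str.isIn p.1 m then acc ||| p.2 else acc) acc
      = if ws.any (fun w => PySem.Str.isIn w m) then acc ||| b else acc := by
  induction ws generalizing acc with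
  | nil => simp
  | cons w ws ih =>
      simp only [List.map_cons, List.foldl_cons, List.any_cons, ih]
      rcases Bool.eq_false_or_eq_true (PySem.Str.isIn w m) with hw | hw <;>
        rcases Bool.eq_false_or_eq_true (ws.any fun w => PySem.Str.isIn w m) with hr | hr <;>
          simp only [hw, hr] <;> simp [Nat.or_assoc, Nat.or_self]

theorem pvKeywordBits_chunks :
    pvKeywordBits
      = (["create", "new", "how to", "make", "generate", "add"].map (fun w => (w, (1:Nat))))
        ++ (["invoice", "sales invoice", "bill"].map (fun w => (w, (2:Nat))))
        ++ (["forecast", "projection", "prediction"].map (fun w => (w, (4:Nat))))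
        ++ (["region", "area", "territory", "location"].map (fun w => (w, (8:Nat))))
        ++ (["product", "item", "sku"].map (fun w => (w, (16:Nat))))
        ++ (["top", "best", "popular", "leading"].map (fun w => (w, (32:Nat)))) := rfl

-- ===== VERDICT (by name: the statement is the Claim_ definition above) =====
theorem detect_method_py_spec : Claim_equal_detect_method_py := by
  intro message _
  unfold Spec_detect_method_py detect_method_py detect_method_py_alt
  simp only [pvKeywordBits_chunks, List.foldl_append, pvFoldChunk]
  generalize (["create", "new", "how to", "make", "generate", "add"].any
      fun w => PySem.Str.isIn w (PySem.Str.lower message)) = g1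
  generalize (["invoice", "sales invoice", "bill"].any
      fun w => PySem.Str.isIn w (PySem.Str.lower message)) = g2
  generalize (["forecast", "projection", "prediction"].any
      fun w => PySem.Str.isIn w (PySem.Str.lower message)) = g3
  generalize (["region", "area", "territory", "location"].any
      fun w => PySem.Str.isIn w (PySem.Str.lower message)) = g4
  generalize (["product", "item", "sku"].any
      fun w => PySem.Str.isIn w (PySem.Str.lower message)) = g5
  generalize (["top", "best", "popular", "leading"].any
      fun w => PySem.Str.isIn w (PySem.Str.lower message)) = g6
  revert g1 g2 g3 g4 g5 g6
  decide
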